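-- pv_equiv track=rewrite | github.com/GINK03/bot-detect-and-block | 001_check_rough.py | near_1800_multiples
-- ===== SOURCE A (Python) =====
-- def near_1800_multiples(x):
--     try:
--         s = sorted([abs(x - 600 * i) for i in range(1, 10 * 24 + 1)])
--         min_time = s[0]
--         if min_time <= 60:
--             return True
--         else:
--             return False
--     except:
--         return False
-- ===== SOURCE B (Python) =====
-- def near_1800_multiples(x):
--     i = (x + 300) // 600
--     if i < 1:
--         i = 1
--     elif i > 240:
--         i = 240
--     return abs(x - 600 * i) <= 60
-- ===== Notes on version B (the rewrite author's own statement) =====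
-- stated objective: simpler
-- what changed: Replaces the 240-element distance-list build + sort + head with a closed-form clamped nearest-multiple index ((x+300)//600 clamped into the scanned range) and a single distance test.
import Mathlib
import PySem

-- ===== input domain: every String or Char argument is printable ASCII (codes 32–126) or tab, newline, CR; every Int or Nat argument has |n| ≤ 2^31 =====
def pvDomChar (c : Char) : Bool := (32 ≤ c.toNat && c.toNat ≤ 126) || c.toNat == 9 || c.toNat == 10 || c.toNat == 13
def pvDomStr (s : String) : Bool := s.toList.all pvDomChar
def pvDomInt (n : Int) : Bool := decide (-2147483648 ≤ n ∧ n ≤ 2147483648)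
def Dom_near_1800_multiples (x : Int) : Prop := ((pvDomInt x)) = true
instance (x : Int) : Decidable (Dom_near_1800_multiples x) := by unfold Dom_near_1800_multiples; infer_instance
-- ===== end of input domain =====

-- B (simpler): replaces A's 240-element distance list + sort + head by a closed-form clamped
-- nearest-multiple index and one distance test; same return value on every Int input.

-- ===== PORT A =====
-- s = sorted([abs(x - 600*i) for i in range(1, 241)]); min_time = s[0]; return min_time <= 60
-- (the list is never empty, so the except branch — returning False — is unreachable for Int x;
-- it is still ported as the none case of pyGet?)
def near_1800_multiples (x : Int) : Bool :=
  match PySem.List.pyGet?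
      (PySem.List.sorted ((PySem.List.pyRange 1 241 1).map (fun i => |x - 600 * i|))
        (fun v => v) false) 0 with
  | some min_time => decide (min_time ≤ 60)
  | none => false

-- ===== PORT B =====
def near_1800_multiples_alt (x : Int) : Bool :=
  let i0 := PySem.Int.floordiv (x + 300) 600
  let i := if i0 < 1 then 1 else if i0 > 240 then (240 : Int) else i0
  decide (|x - 600 * i| ≤ 60)

-- ===== PRECONDITION & SPEC =====
def Spec_near_1800_multiples (x : Int) (out : Bool) : Prop := out = near_1800_multiples_alt x
instance (x : Int) (out : Bool) : Decidable (Spec_near_1800_multiples x out) := by unfold Spec_near_1800_multiples; infer_instance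

-- ===== CLAIM (what is proved, stated in full; the proofs are below) =====
def Claim_equal_near_1800_multiples : Prop := ∀ (x : Int), Dom_near_1800_multiples x → Spec_near_1800_multiples x (near_1800_multiples x)

-- ===== LEMMAS AND PROOFS =====

theorem near_1800_eq (x : Int) : near_1800_multiples x = near_1800_multiples_alt x := by
  unfold near_1800_multiples near_1800_multiples_alt
  simp only []
  set l := (PySem.List.pyRange 1 241 1).map (fun i => |x - 600 * i|) with hl
  have hlne : l ≠ [] := by
    have : (1 : Int) ∈ PySem.List.pyRange 1 241 1 := by
      rw [PySem.List.mem_pyRange_one]; omega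
    intro h
    simp [hl] at h
    exact (List.ne_nil_of_mem this) h
  obtain ⟨m, t, hs⟩ : ∃ m t, PySem.List.sorted l (fun v => v) false = m :: t := by
    cases hsort : PySem.List.sorted l (fun v => v) false with
    | nil => exact absurd ((PySem.List.sorted_eq_nil_iff _ _ _).mp hsort) hlne
    | cons a b => exact ⟨a, b, rfl⟩
  have hmem : m ∈ l := by
    have : m ∈ PySem.List.sorted l (fun v => v) false := by rw [hs]; exact List.mem_cons_self
    exact (PySem.List.mem_sorted _ _ _ _).mp this
  have hmin : ∀ y ∈ l, m ≤ y := PySem.List.key_head_sorted_le l (fun v => v) hs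
  rw [hs]
  have hget : PySem.List.pyGet? (m :: t) 0 = some m := by
    simp [PySem.List.pyGet?, PySem.List.pyIdx?]
  rw [hget]
  -- both sides are decide-propositions; reduce to an iff
  set i0 := PySem.Int.floordiv (x + 300) 600 with hi0
  have hdiv : i0 = (x + 300) / 600 := PySem.Int.floordiv_eq_ediv_of_pos (by norm_num)
  set ic : Int := if i0 < 1 then 1 else if i0 > 240 then (240 : Int) else i0 with hic
  have hic1 : 1 ≤ ic := by rw [hic]; split_ifs <;> omega
  have hic2 : ic ≤ 240 := by rw [hic]; split_ifs <;> omega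
  have hicmem : |x - 600 * ic| ∈ l := by
    rw [hl]
    refine List.mem_map.2 ⟨ic, ?_, rfl⟩
    rw [PySem.List.mem_pyRange_one]; omega
  simp only [decide_eq_decide]
  constructor
  · intro hm
    -- m = |x - 600*i| for some 1 ≤ i ≤ 240 with the distance ≤ 60; then i0 clamps to i
    obtain ⟨i, hi, hmi⟩ := List.mem_map.1 (hl ▸ hmem)
    rw [PySem.List.mem_pyRange_one] at hi
    have hdist : |x - 600 * i| ≤ 60 := by omega
    have hx1 : 600 * i - 60 ≤ x := by
      rcases abs_le.1 hdist with ⟨h1, h2⟩; omega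
    have hx2 : x ≤ 600 * i + 60 := by
      rcases abs_le.1 hdist with ⟨h1, h2⟩; omega
    have hi0i : i0 = i := by
      rw [hdiv]; omega
    have hici : ic = i := by rw [hic]; split_ifs <;> omega
    rw [hici]
    exact hdist
  · intro hd
    exact le_trans (hmin _ hicmem) hd

-- ===== VERDICT (by name: the statement is the Claim_ definition above) =====
theorem near_1800_multiples_spec : Claim_equal_near_1800_multiples := by
  intro x _
  unfold Spec_near_1800_multiples
  exact near_1800_eq x
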